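-- pv_equiv track=rewrite | github.com/sigven/vcfmerge | vcfmerge.py | get_sample_column_index
-- ===== SOURCE A (Python) =====
-- def get_sample_column_index(header_line, tumor_sample_id, control_sample_id):
--     headers = header_line.rstrip().split('\t')
--     i = 0
--     tumor_sample_index_column = -1
--     control_sample_index_column = -1
--     while i < len(headers):
--         if headers[i] == tumor_sample_id or str(headers[i]) == 'TUMOR':
--             tumor_sample_index_column = i
--         if headers[i] == control_sample_id or str(headers[i]) == 'NORMAL':
--             control_sample_index_column = i
--         i = i + 1
--     return {'tumor_sample_index_column':tumor_sample_index_column, 'control_sample_index_column':control_sample_index_column}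
-- ===== SOURCE B (Python) =====
-- def get_sample_column_index(header_line, tumor_sample_id, control_sample_id):
--     headers = header_line.rstrip().split('\t')
--     def last_index(names):
--         for i in range(len(headers) - 1, -1, -1):
--             if headers[i] in names:
--                 return i
--         return -1
--     return {'tumor_sample_index_column': last_index((tumor_sample_id, 'TUMOR')),
--             'control_sample_index_column': last_index((control_sample_id, 'NORMAL'))}
-- ===== Notes on version B (the rewrite author's own statement) =====
-- stated objective: alternative
-- what changed: Replaces A's single interleaved forward pass maintaining two accumulators by two independent backward searches (range(len-1,-1,-1)) that early-return the first index from the right whose header is among the role's candidate names.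
import Mathlib
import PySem

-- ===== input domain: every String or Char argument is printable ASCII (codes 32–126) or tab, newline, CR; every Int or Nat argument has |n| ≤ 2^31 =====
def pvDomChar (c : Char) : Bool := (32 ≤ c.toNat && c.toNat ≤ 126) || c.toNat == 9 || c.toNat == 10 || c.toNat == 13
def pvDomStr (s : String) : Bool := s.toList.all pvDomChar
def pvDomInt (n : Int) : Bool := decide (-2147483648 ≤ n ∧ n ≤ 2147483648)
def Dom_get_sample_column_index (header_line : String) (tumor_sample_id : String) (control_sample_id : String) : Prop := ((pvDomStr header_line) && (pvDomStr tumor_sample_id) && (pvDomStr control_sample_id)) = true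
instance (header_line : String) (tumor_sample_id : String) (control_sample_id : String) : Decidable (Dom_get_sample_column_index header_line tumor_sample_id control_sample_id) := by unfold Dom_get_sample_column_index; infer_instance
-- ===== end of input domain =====

-- B replaces A's single interleaved forward pass by two independent backward searches with early exit (alternative decomposition; same cost).

-- ===== PORT A =====
-- while i < len(headers): headers[i] is always in range, so pyGetD's default "" is never used
def get_sample_column_index (header_line : String) (tumor_sample_id : String) (control_sample_id : String) : List (String × Int) :=
  let headers := (PySem.Str.split? (PySem.Str.rstrip header_line) "\t").getD []  -- split? is none only for sep = ""; sep here is "\t"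
  let st :=
    (PySem.List.pyRange 0 (PySem.List.len headers) 1).foldl
      (fun (st : Int × Int) i =>
        ((if PySem.List.pyGetD headers i "" = tumor_sample_id ∨ PySem.List.pyGetD headers i "" = "TUMOR" then i else st.1),
         (if PySem.List.pyGetD headers i "" = control_sample_id ∨ PySem.List.pyGetD headers i "" = "NORMAL" then i else st.2)))
      (-1, -1)
  [("tumor_sample_index_column", st.1), ("control_sample_index_column", st.2)]

-- ===== PORT B =====
-- the for-loop of last_index with its early 'return i': first index in the countdown list whose header is in names, else -1
def pvLastIndexLoop (headers : List String) (names : List String) : List Int → Int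
  | [] => -1
  | i :: rest =>
      if names.contains (PySem.List.pyGetD headers i "") then i
      else pvLastIndexLoop headers names rest

def get_sample_column_index_alt (header_line : String) (tumor_sample_id : String) (control_sample_id : String) : List (String × Int) :=
  let headers := (PySem.Str.split? (PySem.Str.rstrip header_line) "\t").getD []  -- split? is none only for sep = ""; sep here is "\t"
  let last_index := fun (names : List String) =>
    pvLastIndexLoop headers names (PySem.List.pyRange (PySem.List.len headers - 1) (-1) (-1))
  [("tumor_sample_index_column", last_index [tumor_sample_id, "TUMOR"]),
   ("control_sample_index_column", last_index [control_sample_id, "NORMAL"])]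

-- ===== PRECONDITION & SPEC =====
def Spec_get_sample_column_index (header_line : String) (tumor_sample_id : String) (control_sample_id : String) (out : List (String × Int)) : Prop := out = get_sample_column_index_alt header_line tumor_sample_id control_sample_id
instance (header_line : String) (tumor_sample_id : String) (control_sample_id : String) (out : List (String × Int)) : Decidable (Spec_get_sample_column_index header_line tumor_sample_id control_sample_id out) := by unfold Spec_get_sample_column_index; infer_instance

-- ===== CLAIM (what is proved, stated in full; the proofs are below) =====
def Claim_equal_get_sample_column_index : Prop := ∀ (header_line : String) (tumor_sample_id : String) (control_sample_id : String), Dom_get_sample_column_index header_line tumor_sample_id control_sample_id → Spec_get_sample_column_index header_line tumor_sample_id control_sample_id (get_sample_column_index header_line tumor_sample_id control_sample_id)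

-- ===== LEMMAS AND PROOFS =====

-- first match in a list of indices (generic predicate), default c
def fm (P : Int → Prop) [DecidablePred P] : List Int → Int → Int
  | [], c => c
  | x :: t, c => if P x then x else fm P t c

theorem fm_append_singleton (P : Int → Prop) [DecidablePred P] (L : List Int) (x c : Int) :
    fm P (L ++ [x]) c = fm P L (if P x then x else c) := by
  induction L with
  | nil => rfl
  | cons y t ih => by_cases hy : P y <;> simp [fm, hy, ih]

-- last-match forward fold = first match over the reversed index list
theorem foldl_eq_fm_reverse (P : Int → Prop) [DecidablePred P] (l : List Int) (c : Int) :
    l.foldl (fun a i => if P i then i else a) c = fm P l.reverse c := by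
  induction l generalizing c with
  | nil => rfl
  | cons x t ih =>
    simp only [List.foldl_cons, List.reverse_cons, fm_append_singleton]
    exact ih _

theorem fm_congr (P Q : Int → Prop) [DecidablePred P] [DecidablePred Q]
    (h : ∀ i, P i ↔ Q i) (l : List Int) (c : Int) : fm P l c = fm Q l c := by
  induction l with
  | nil => rfl
  | cons x t ih => simp only [fm, h x, ih]

theorem pvLastIndexLoop_eq_fm (headers names : List String) (l : List Int) :
    pvLastIndexLoop headers names l
      = fm (fun i => PySem.List.pyGetD headers i "" ∈ names) l (-1) := by
  induction l with
  | nil => rfl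
  | cons x t ih =>
    simp only [pvLastIndexLoop, fm, ih]
    by_cases hx : PySem.List.pyGetD headers x "" ∈ names
    · simp [hx]
    · simp [hx]

theorem pair_fold (P Q : Int → Prop) [DecidablePred P] [DecidablePred Q]
    (L : List Int) (a b : Int) :
    L.foldl (fun (st : Int × Int) i =>
        ((if P i then i else st.1), (if Q i then i else st.2))) (a, b)
    = (L.foldl (fun t i => if P i then i else t) a,
       L.foldl (fun c i => if Q i then i else c) b) := by
  induction L generalizing a b with
  | nil => rfl
  | cons x t ih => simp only [List.foldl_cons]; exact ih _ _

-- one role's component of A's fold equals B's backward search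
theorem component_eq (headers : List String) (v1 v2 : String) :
    (PySem.List.pyRange 0 (PySem.List.len headers) 1).foldl
      (fun a i => if PySem.List.pyGetD headers i "" = v1 ∨ PySem.List.pyGetD headers i "" = v2 then i else a) (-1)
    = pvLastIndexLoop headers [v1, v2] (PySem.List.pyRange (PySem.List.len headers - 1) (-1) (-1)) := by
  rw [pvLastIndexLoop_eq_fm, foldl_eq_fm_reverse]
  have hr : PySem.List.pyRange (PySem.List.len headers - 1) (-1) (-1)
      = (PySem.List.pyRange 0 (PySem.List.len headers) 1).reverse := by
    rw [PySem.List.pyRange_neg_one_eq_reverse]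
    norm_num
  rw [hr]
  exact fm_congr _ _ (by intro i; simp) _ _

-- ===== VERDICT (by name: the statement is the Claim_ definition above) =====
theorem get_sample_column_index_spec : Claim_equal_get_sample_column_index := by
  intro hl tid cid _
  unfold Spec_get_sample_column_index get_sample_column_index get_sample_column_index_alt
  dsimp only []
  set headers := (PySem.Str.split? (PySem.Str.rstrip hl) "\t").getD [] with hh
  rw [pair_fold (fun i => PySem.List.pyGetD headers i "" = tid ∨ PySem.List.pyGetD headers i "" = "TUMOR")
        (fun i => PySem.List.pyGetD headers i "" = cid ∨ PySem.List.pyGetD headers i "" = "NORMAL"),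
      component_eq headers tid "TUMOR", component_eq headers cid "NORMAL"]
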